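-- pv_equiv track=rewrite | github.com/lkq2959/Wensihaihui | longnum_add.py | longnum_added
-- ===== SOURCE A (Python) =====
-- def longnum_added(num1,num2):
--     """
--     :type num1: string of numbers
--     :type num2: string of numbers
--     :rtype: str
--     """
--     #分离整数和小数
--     (I1,D1) = IntAndDec(num1)
--     (I2,D2) = IntAndDec(num2)
--     #小数部分
--     no_deci = 0
--     if D1 == "0" and D2 == "0":
--         no_deci = 1
--     max_length = max(len(D1),len(D2))
--     D_sum = [0]*(max_length+1)
--     if len(D1) > len(D2):
--         for i in range(len(D1) - len(D2)):
--             D2 += "0"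
--     else:
--         for i in range(len(D2) - len(D1)):
--             D1 += "0"
--     D1 = list(D1)
--     D2 = list(D2)
--     for idx in range(max_length-1,-1,-1):
--         temp1 = int(D1[idx])
--         temp2 = int(D2[idx])
--         temp_sum = temp1 + temp2
--
--         if temp_sum >= 10:
--             D_sum[idx+1] += temp_sum - 10
--             D_sum[idx] = 1
--         else:
--             if D_sum[idx+1] + temp_sum >= 10:
--                 D_sum[idx+1] += temp_sum - 10
--                 D_sum[idx] = 1
--             else:
--                 D_sum[idx+1] += temp_sum
--
--     #整数部分
--     max_length = max(len(I1),len(I2))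
--     ret = [0]*(max_length+1)
--     if D_sum[0] == 1:
--         ret[max_length] = 1
--     #通过加0来使input长度相同
--     I1 = I1.zfill(max_length)
--     I2 = I2.zfill(max_length)
--
--     #将input转化成list of char
--     n1 = list(I1)
--     n2 = list(I2)
--
--     #add each index of two input into ret
--     for idx in range(max_length-1,-1,-1):
--         #switch string into int
--         temp1 = int(n1[idx])
--         temp2 = int(n2[idx])
--         temp_sum = temp1 + temp2
--
--         if temp_sum >= 10:
--             ret[idx+1] += temp_sum - 10
--             ret[idx] = 1
--         else:
--             if ret[idx+1] + temp_sum >= 10: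
--                 ret[idx+1] += temp_sum - 10
--                 ret[idx] = 1
--             else:
--                 ret[idx+1] += temp_sum
--     #结果与input数位相同
--     if ret[0] == 0:
--         ret = ret[1:max_length+1]
--
--     ret = ''.join(map(str,ret))
--     #有小数
--     if no_deci == 0:
--         ret = ret + '.'+ ''.join(map(str,D_sum[1:len(D_sum)]))
--     return ret
--
-- def IntAndDec(num):
--     posn = num.find('.')
--     if posn == -1:
--         Inti = num
--         Deci = "0"
--     else:
--         Inti = num[0:posn]
--         Deci = num[posn+1:len(num)]
--     return (Inti, Deci)
-- ===== SOURCE B (Python) =====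
-- def longnum_added(num1, num2):
--     """
--     :type num1: string of numbers
--     :type num2: string of numbers
--     :rtype: str
--     """
--     def split(s):
--         if '.' in s:
--             i, d = s.split('.', 1)
--             return i, d
--         return s, '0'
--     (i1, d1) = split(num1)
--     (i2, d2) = split(num2)
--     no_deci = (d1 == '0' and d2 == '0')
--     dec_len = max(len(d1), len(d2))
--     dec_sum = int('0' + d1.ljust(dec_len, '0')) + int('0' + d2.ljust(dec_len, '0'))
--     carry, rest = divmod(dec_sum, 10 ** dec_len)
--     dec = str(10 ** dec_len + rest)[1:]        # exactly dec_len digits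
--     int_len = max(len(i1), len(i2))
--     total = int('0' + i1) + int('0' + i2) + carry
--     if int_len == 0:
--         head = '' if total == 0 else str(total)
--     else:
--         head = str(total).zfill(int_len)
--     return head if no_deci else head + '.' + dec
-- ===== Notes on version B (the rewrite author's own statement) =====
-- stated objective: simpler
-- what changed: Replaces the two hand-written digit-array ripple-carry loops (pad, index downward, per-digit carry cells) by direct integer arithmetic: parse the aligned decimal and integer parts with int(), add them, and format the two sums back with divmod/zfill/string padding.
import Mathlib
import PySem

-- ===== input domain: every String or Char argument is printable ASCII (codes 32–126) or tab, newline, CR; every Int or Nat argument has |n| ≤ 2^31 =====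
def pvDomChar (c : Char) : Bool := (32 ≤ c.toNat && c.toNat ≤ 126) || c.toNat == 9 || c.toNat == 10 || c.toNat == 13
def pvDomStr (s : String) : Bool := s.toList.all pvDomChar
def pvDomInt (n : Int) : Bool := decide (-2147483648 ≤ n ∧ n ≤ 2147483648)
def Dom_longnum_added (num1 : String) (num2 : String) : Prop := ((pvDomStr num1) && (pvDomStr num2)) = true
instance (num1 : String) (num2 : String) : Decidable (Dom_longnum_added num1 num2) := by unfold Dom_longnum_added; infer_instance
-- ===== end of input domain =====

-- B replaces A's two digit-array ripple-carry loops by int() arithmetic plus divmod/zfill formatting; proved equal on Pre_ (digit strings with at most one '.').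

-- ===== PORT A =====

-- int(c) for a single char: exact for '0'..'9'; on any other char Python raises ValueError (excluded by Pre_)
def pyIntChar (c : Char) : Int := (c.toNat : Int) - 48

-- IntAndDec(num)
def intAndDec (cs : List Char) : List Char × List Char :=
  let posn := PySem.Chars.find cs ['.']
  if posn = -1 then (cs, ['0'])
  else (PySem.List.slice cs (some 0) (some posn),
        PySem.List.slice cs (some (posn + 1)) (some (cs.length : Int)))

-- the shared loop body of A's two for-loops (list assignment s[i] = v is List.set; indices are ≥ 0 here)
def stepA (x y : List Char) (s : List Int) (idx : Int) : List Int :=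
  let temp1 := pyIntChar ((PySem.List.pyGet? x idx).getD '0')
  let temp2 := pyIntChar ((PySem.List.pyGet? y idx).getD '0')
  let tempSum := temp1 + temp2
  if tempSum ≥ 10 then
    (s.set (idx + 1).toNat (PySem.List.pyGetD s (idx + 1) 0 + tempSum - 10)).set idx.toNat 1
  else if PySem.List.pyGetD s (idx + 1) 0 + tempSum ≥ 10 then
    (s.set (idx + 1).toNat (PySem.List.pyGetD s (idx + 1) 0 + tempSum - 10)).set idx.toNat 1
  else
    s.set (idx + 1).toNat (PySem.List.pyGetD s (idx + 1) 0 + tempSum)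

def longnum_added (num1 : String) (num2 : String) : String :=
  let p1 := intAndDec num1.toList
  let p2 := intAndDec num2.toList
  let I1 := p1.1; let D1 := p1.2
  let I2 := p2.1; let D2 := p2.2
  let no_deci : Int := if D1 = ['0'] ∧ D2 = ['0'] then 1 else 0
  let max_length : Nat := max D1.length D2.length
  let D_sum0 : List Int := List.replicate (max_length + 1) 0
  -- the padding for-loops append "0" once per iteration
  let D1p := if D1.length > D2.length then D1
             else List.foldl (fun s _ => s ++ ['0']) D1 (PySem.List.pyRange 0 ((D2.length : Int) - (D1.length : Int)))
  let D2p := if D1.length > D2.length then List.foldl (fun s _ => s ++ ['0']) D2 (PySem.List.pyRange 0 ((D1.length : Int) - (D2.length : Int)))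
             else D2
  let D_sum := List.foldl (stepA D1p D2p) D_sum0 (PySem.List.pyRange ((max_length : Int) - 1) (-1) (-1))
  let int_len : Nat := max I1.length I2.length
  let ret0 : List Int := List.replicate (int_len + 1) 0
  let ret1 := if PySem.List.pyGetD D_sum 0 0 = 1 then ret0.set int_len 1 else ret0
  let I1z := PySem.Chars.zfill I1 (int_len : Int)
  let I2z := PySem.Chars.zfill I2 (int_len : Int)
  let ret2 := List.foldl (stepA I1z I2z) ret1 (PySem.List.pyRange ((int_len : Int) - 1) (-1) (-1))
  let ret3 := if PySem.List.pyGetD ret2 0 0 = 0 then PySem.List.slice ret2 (some 1) (some ((int_len : Int) + 1)) else ret2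
  let retS := PySem.Chars.join [] (ret3.map PySem.Int.toChars)
  let retS2 := if no_deci = 0
               then retS ++ ['.'] ++ PySem.Chars.join [] ((PySem.List.slice D_sum (some 1) (some (D_sum.length : Int))).map PySem.Int.toChars)
               else retS
  String.ofList retS2

-- ===== PORT B =====

-- decimal value of a digit string (helper of the int() port below)
def dvalN (cs : List Char) : Nat := cs.foldl (fun a c => 10 * a + (c.toNat - 48)) 0

-- int(s): hand-ported for the nonempty all-digit strings it receives under Pre_ (exact there; Python raises elsewhere)
def pyIntDigits (cs : List Char) : Int := (dvalN cs : Int)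

-- s.split('.', 1) after an "'.' in s" test (first-occurrence split)
def splitB (cs : List Char) : List Char × List Char :=
  if PySem.Chars.isIn ['.'] cs then
    (cs.takeWhile (fun c => c ≠ '.'), cs.drop ((cs.takeWhile (fun c => c ≠ '.')).length + 1))
  else (cs, ['0'])

def longnum_added_alt (num1 : String) (num2 : String) : String :=
  let q1 := splitB num1.toList
  let q2 := splitB num2.toList
  let i1 := q1.1; let d1 := q1.2
  let i2 := q2.1; let d2 := q2.2
  let dec_len : Nat := max d1.length d2.length
  -- d.ljust(dec_len, '0') hand-ported as right-padding with '0'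
  let dec_sum := pyIntDigits ('0' :: (d1 ++ List.replicate (dec_len - d1.length) '0'))
               + pyIntDigits ('0' :: (d2 ++ List.replicate (dec_len - d2.length) '0'))
  let cr := (PySem.Int.divmod? dec_sum ((10 : Int) ^ dec_len)).getD (0, 0)
  let carry := cr.1; let rest := cr.2
  let dec := PySem.List.slice (PySem.Int.toChars ((10 : Int) ^ dec_len + rest)) (some 1) none
  let int_len : Nat := max i1.length i2.length
  let total := pyIntDigits ('0' :: i1) + pyIntDigits ('0' :: i2) + carry
  let head := if int_len = 0 then (if total = 0 then ([] : List Char) else PySem.Int.toChars total)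
              else PySem.Chars.zfill (PySem.Int.toChars total) (int_len : Int)
  String.ofList (if d1 = ['0'] ∧ d2 = ['0'] then head else head ++ '.' :: dec)

-- ===== PRECONDITION & SPEC =====

-- exactly the inputs where A returns: every character a decimal digit or '.', with at most one '.' per argument
-- (on any other printable input some int(c)/int(s) call in A raises ValueError)
def Pre_longnum_added (num1 : String) (num2 : String) : Prop :=
  num1.toList.all (fun c => c.isDigit || c == '.') = true ∧ num1.toList.count '.' ≤ 1 ∧
  num2.toList.all (fun c => c.isDigit || c == '.') = true ∧ num2.toList.count '.' ≤ 1

instance (num1 : String) (num2 : String) : Decidable (Pre_longnum_added num1 num2) := by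
  unfold Pre_longnum_added; infer_instance

def pvWitness_longnum_added : String × String := ("13.579", "2.86")

def Spec_longnum_added (num1 : String) (num2 : String) (out : String) : Prop :=
  out = longnum_added_alt num1 num2
instance (num1 : String) (num2 : String) (out : String) : Decidable (Spec_longnum_added num1 num2 out) := by
  unfold Spec_longnum_added; infer_instance

-- ===== CLAIM (what is proved, stated in full; the proofs are below) =====
def Claim_equal_longnum_added : Prop :=
  ∀ (num1 : String) (num2 : String), Dom_longnum_added num1 num2 →
    Pre_longnum_added num1 num2 → Spec_longnum_added num1 num2 (longnum_added num1 num2)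

-- ===== LEMMAS AND PROOFS =====

-- big-endian base-10 representation of n in exactly L digits (n < 10^L)
def digitsBE : Nat → Nat → List Nat
  | 0, _ => []
  | L + 1, n => digitsBE L (n / 10) ++ [n % 10]

-- str(n) for n : Nat, as a digit list: [0] for 0, else the digits of n big-endian
def repD (n : Nat) : List Nat := if n = 0 then [0] else (Nat.digits 10 n).reverse

lemma length_digitsBE (L n : Nat) : (digitsBE L n).length = L := by
  induction L generalizing n with
  | zero => rfl
  | succ L ih => simp [digitsBE, ih]

lemma digitsBE_lt (L n : Nat) : ∀ d ∈ digitsBE L n, d < 10 := by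
  induction L generalizing n with
  | zero => simp [digitsBE]
  | succ L ih => simp only [digitsBE, List.mem_append, List.mem_singleton]
                 rintro d (h | rfl)
                 · exact ih _ _ h
                 · omega

lemma digitsBE_cons (L n : Nat) (h : n < 10 ^ (L + 1)) :
    digitsBE (L + 1) n = n / 10 ^ L :: digitsBE L (n % 10 ^ L) := by
  induction L generalizing n with
  | zero => simp [digitsBE]; omega
  | succ L ih =>
      have h10 : n / 10 < 10 ^ (L + 1) := by
        rw [Nat.div_lt_iff_lt_mul (by norm_num)]; calc n < 10 ^ (L + 2) := h
        _ = 10 ^ (L+1) * 10 := by ring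
      show digitsBE (L + 1) (n / 10) ++ [n % 10] = _
      rw [ih _ h10]
      have e1 : n / 10 / 10 ^ L = n / 10 ^ (L + 1) := by
        rw [Nat.div_div_eq_div_mul]; ring_nf
      have e2 : n / 10 % 10 ^ L = n % 10 ^ (L + 1) / 10 := by
        have := Nat.mod_mul_right_div_self n 10 (10 ^ L)
        rw [show (10:ℕ) * 10 ^ L = 10 ^ (L+1) by ring] at this
        omega
      have e3 : n % 10 ^ (L + 1) % 10 = n % 10 :=
        Nat.mod_mod_of_dvd n (dvd_pow_self 10 (Nat.succ_ne_zero L))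
      rw [e1, e2,
          show digitsBE (L + 1) (n % 10 ^ (L + 1))
             = digitsBE L (n % 10 ^ (L + 1) / 10) ++ [n % 10 ^ (L + 1) % 10] from rfl,
          e3]
      simp

lemma digitsBE_pad (L n : Nat) (h : n < 10 ^ L) :
    digitsBE L n = List.replicate (L - (Nat.digits 10 n).length) 0 ++ (Nat.digits 10 n).reverse := by
  induction L generalizing n with
  | zero => interval_cases n; simp [digitsBE]
  | succ L ih =>
      by_cases h0 : n = 0
      · subst h0
        have : digitsBE (L+1) 0 = List.replicate L 0 ++ [0 % 10] := by
          rw [digitsBE, Nat.zero_div, ih 0 (by positivity)]; simp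
        simpa [← List.replicate_succ' (n := L)] using this
      · rw [digitsBE, Nat.digits_def' (by norm_num : (1:ℕ) < 10) (Nat.pos_of_ne_zero h0)]
        have hd : n / 10 < 10 ^ L := by
          rw [Nat.div_lt_iff_lt_mul (by norm_num)]
          calc n < 10 ^ (L+1) := h
          _ = 10 ^ L * 10 := by ring
        rw [ih _ hd]
        simp [List.append_assoc]

lemma digits_pow_add (L m : Nat) (h : m < 10 ^ L) :
    (Nat.digits 10 (10 ^ L + m)).reverse = 1 :: digitsBE L m := by
  induction L generalizing m with
  | zero => interval_cases m; simp [digitsBE]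
  | succ L ih =>
      have hpos : 0 < 10 ^ (L+1) + m := by positivity
      rw [Nat.digits_def' (by norm_num : (1:ℕ) < 10) hpos]
      have e1 : (10 ^ (L+1) + m) % 10 = m % 10 := by
        have : (10:ℕ) ∣ 10 ^ (L+1) := dvd_pow_self 10 (Nat.succ_ne_zero L)
        omega
      have e2 : (10 ^ (L+1) + m) / 10 = 10 ^ L + m / 10 := by
        have : (10:ℕ) ^ (L+1) = 10 * 10 ^ L := by ring
        omega
      have hm : m / 10 < 10 ^ L := by
        rw [Nat.div_lt_iff_lt_mul (by norm_num)]
        calc m < 10 ^ (L+1) := h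
        _ = 10 ^ L * 10 := by ring
      rw [e1, e2]
      simp only [List.reverse_cons, ih _ hm]
      rfl

lemma toDigitsCore_eq (f n : Nat) (acc : List Char) (h : n < f) :
    Nat.toDigitsCore 10 f n acc = (repD n).map Nat.digitChar ++ acc := by
  induction f generalizing n acc with
  | zero => omega
  | succ f ih =>
      rw [Nat.toDigitsCore]
      by_cases h0 : n / 10 = 0
      · have hn : n < 10 := by omega
        rw [if_pos h0]
        by_cases hz : n = 0
        · subst hz; simp [repD]
        · rw [repD, if_neg hz, Nat.digits_def' (by norm_num : (1:ℕ) < 10) (Nat.pos_of_ne_zero hz), h0]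
          simp [Nat.mod_eq_of_lt hn]
      · rw [if_neg h0]
        rw [ih (n / 10) _ (by omega)]
        rw [repD, if_neg h0, repD,
            if_neg (by omega : ¬ n = 0),
            Nat.digits_def' (by norm_num : (1:ℕ) < 10) (by omega : 0 < n)]
        simp

lemma toDigits_eq (n : Nat) : Nat.toDigits 10 n = (repD n).map Nat.digitChar := by
  rw [Nat.toDigits, toDigitsCore_eq _ _ _ (Nat.lt_succ_self n)]; simp

lemma toChars_natCast (n : Nat) : PySem.Int.toChars (n : Int) = (repD n).map Nat.digitChar := by
  rw [PySem.Int.toChars]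
  rw [if_neg (by omega : ¬ (n : Int) < 0)]
  simp [toDigits_eq]

lemma toChars_digit (d : Nat) (h : d < 10) :
    PySem.Int.toChars (d : Int) = [Nat.digitChar d] := by
  rw [toChars_natCast, repD]
  by_cases h0 : d = 0
  · subst h0; simp
  · rw [if_neg h0, Nat.digits_def' (by norm_num : (1:ℕ) < 10) (Nat.pos_of_ne_zero h0),
        Nat.div_eq_of_lt h, Nat.mod_eq_of_lt h]
    simp

lemma isDigit_toNat {c : Char} (h : c.isDigit = true) : 48 ≤ c.toNat ∧ c.toNat ≤ 57 := by
  simp [Char.isDigit] at h; exact ⟨h.1, h.2⟩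

lemma dvalN_append_singleton (xs : List Char) (c : Char) :
    dvalN (xs ++ [c]) = 10 * dvalN xs + (c.toNat - 48) := by
  simp [dvalN, List.foldl_append]

lemma dvalN_cons_zero (cs : List Char) : dvalN ('0' :: cs) = dvalN cs := rfl

lemma dvalN_replicate_zero (k : Nat) (cs : List Char) :
    dvalN (List.replicate k '0' ++ cs) = dvalN cs := by
  induction k with
  | zero => rfl
  | succ k ih => simpa [List.replicate_succ] using ih

lemma dvalN_lt (cs : List Char) (h : ∀ c ∈ cs, c.isDigit = true) :
    dvalN cs < 10 ^ cs.length := by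
  induction cs using List.reverseRecOn with
  | nil => simp [dvalN]
  | append_singleton xs c ih =>
      have hc : c.toNat - 48 < 10 := by
        have := isDigit_toNat (h c (by simp))
        omega
      have hx := ih (fun a ha => h a (by simp [ha]))
      rw [dvalN_append_singleton]
      simp only [List.length_append, List.length_singleton]
      calc 10 * dvalN xs + (c.toNat - 48) < 10 * 10 ^ xs.length := by omega
      _ = 10 ^ (xs.length + 1) := by ring

lemma foldl_append_zero (l : List Int) (s : List Char) :
    List.foldl (fun s _ => s ++ ['0']) s l = s ++ List.replicate l.length '0' := by
  induction l generalizing s with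
  | nil => simp
  | cons a l ih => simp [ih, List.replicate_succ, List.append_assoc]

lemma set_replicate_append (n : Nat) (x v y : Int) (l : List Int) :
    (List.replicate n x ++ y :: l).set n v = List.replicate n x ++ v :: l := by
  induction n with
  | zero => rfl
  | succ n ih => simpa [List.replicate_succ] using ih

lemma getD_replicate_append (n : Nat) (x y : Int) (l : List Int) :
    (List.replicate n x ++ y :: l).getD n 0 = y := by
  simp [List.getD]

lemma zfill_no_sign (cs : List Char) (w : Int)
    (h : ∀ c, cs.head? = some c → ¬(c = '+' ∨ c = '-')) :
    PySem.Chars.zfill cs w = List.replicate (w.toNat - cs.length) '0' ++ cs := by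
  rw [PySem.Chars.zfill.eq_def]
  by_cases hle : w ≤ (cs.length : Int)
  · rw [if_pos hle, show w.toNat - cs.length = 0 by omega]; rfl
  · rw [if_neg hle]
    cases cs with
    | nil => simp
    | cons c rest => exact if_neg (h c rfl)

lemma digitChar_no_sign (d : Nat) (h : d < 10) :
    ¬(Nat.digitChar d = '+' ∨ Nat.digitChar d = '-') := by
  interval_cases d <;> decide

lemma repD_lt (n : Nat) : ∀ d ∈ repD n, d < 10 := by
  intro d hd
  rw [repD] at hd
  split at hd
  · simp at hd; omega
  · exact Nat.digits_lt_base (by norm_num) (List.mem_reverse.mp hd)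

-- A's ripple-carry loop over indices j-1 .. 0 computes the base-10 digits of the sum
lemma loop_inv (X Y : List Char) (hX : ∀ c ∈ X, c.isDigit = true) (hY : ∀ c ∈ Y, c.isDigit = true) :
    ∀ (j : Nat) (c : Nat) (ds : List Int), j ≤ X.length → j ≤ Y.length → c ≤ 1 →
    List.foldl (stepA X Y) (List.replicate j (0:Int) ++ (c : Int) :: ds)
      (PySem.List.pyRange ((j : Int) - 1) (-1) (-1))
    = (((dvalN (X.take j) + dvalN (Y.take j) + c) / 10 ^ j : Nat) : Int)
        :: (digitsBE j ((dvalN (X.take j) + dvalN (Y.take j) + c) % 10 ^ j)).map (fun d : Nat => (d : Int))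
        ++ ds := by
  intro j
  induction j with
  | zero =>
      intro c ds _ _ _
      rw [show ((0:Nat):Int) - 1 = -1 by norm_num,
          PySem.List.pyRange_neg_one_eq_nil (le_refl _)]
      simp [dvalN, digitsBE]
  | succ j ih =>
      intro c ds hjX hjY hc
      have hXj : j < X.length := by omega
      have hYj : j < Y.length := by omega
      have hrange : PySem.List.pyRange (((j:Nat)+1 : Int) - 1) (-1) (-1)
          = (j : Int) :: PySem.List.pyRange ((j : Int) - 1) (-1) (-1) := by
        rw [show (((j:Nat)+1 : Int) - 1) = (j : Int) by omega]
        exact PySem.List.pyRange_neg_one_cons (by omega)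
      rw [show (((j+1:Nat)) : Int) = ((j:Nat)+1 : Int) by push_cast; ring, hrange,
          List.foldl_cons]
      -- digit values at position j
      have hgx : PySem.List.pyGet? X (j : Int) = some X[j] := by simp [pysem, hXj]
      have hgy : PySem.List.pyGet? Y (j : Int) = some Y[j] := by simp [pysem, hYj]
      set na := X[j].toNat - 48 with hna
      set nb := Y[j].toNat - 48 with hnb
      have hXd : 48 ≤ X[j].toNat ∧ X[j].toNat ≤ 57 := isDigit_toNat (hX X[j] (List.getElem_mem hXj))
      have hYd : 48 ≤ Y[j].toNat ∧ Y[j].toNat ≤ 57 := isDigit_toNat (hY Y[j] (List.getElem_mem hYj))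
      have hna9 : na ≤ 9 := by omega
      have hnb9 : nb ≤ 9 := by omega
      -- evaluate one step
      have hread : PySem.List.pyGetD (List.replicate (j+1) (0:Int) ++ (c : Int) :: ds) ((j : Int) + 1) 0
          = (c : Int) := by
        rw [show ((j : Int) + 1) = ((j + 1 : Nat) : Int) by omega,
            PySem.List.pyGetD_natCast, getD_replicate_append]
      have hstep : stepA X Y (List.replicate (j+1) (0:Int) ++ (c : Int) :: ds) (j : Int)
          = List.replicate j (0:Int)
              ++ (((na + nb + c) / 10 : Nat) : Int) :: (((na + nb + c) % 10 : Nat) : Int) :: ds := by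
        rw [stepA]
        simp only [hgx, hgy, Option.getD_some, hread, pyIntChar]
        have htoNat1 : ((j : Int) + 1).toNat = j + 1 := by omega
        have htoNatj : ((j : Int)).toNat = j := by omega
        have h8 : ∀ v : Int, List.replicate (j+1) (0:Int) ++ v :: ds
            = List.replicate j (0:Int) ++ (0 : Int) :: v :: ds := by
          intro v; simp [List.replicate_succ' (n := j), List.append_assoc]
        by_cases h1 : (((X[j].toNat : Int) - 48) + ((Y[j].toNat : Int) - 48)) ≥ 10
        · rw [if_pos h1, htoNat1, htoNatj, set_replicate_append, h8, set_replicate_append]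
          congr 1
          congr 1
          · push_cast; omega
          · congr 1
            push_cast; omega
        · rw [if_neg h1]
          by_cases h2 : (c : Int) + (((X[j].toNat : Int) - 48) + ((Y[j].toNat : Int) - 48)) ≥ 10
          · rw [if_pos h2, htoNat1, htoNatj, set_replicate_append, h8, set_replicate_append]
            congr 1
            congr 1
            · push_cast; omega
            · congr 1
              push_cast; omega
          · rw [if_neg h2, htoNat1, set_replicate_append, h8]
            congr 1
            congr 1
            · push_cast; omega
            · congr 1
              push_cast; omega
      rw [hstep]
      have hc' : (na + nb + c) / 10 ≤ 1 := by omega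
      have := ih ((na + nb + c) / 10) ((((na + nb + c) % 10 : Nat) : Int) :: ds)
        (by omega) (by omega) hc'
      rw [this]
      -- arithmetic: fold the processed digit into the value
      set A := dvalN (X.take j) with hA
      set B := dvalN (Y.take j) with hB
      have htake : X.take (j+1) = X.take j ++ [X[j]] := by
        rw [List.take_add_one]; simp [hXj]
      have htakeY : Y.take (j+1) = Y.take j ++ [Y[j]] := by
        rw [List.take_add_one]; simp [hYj]
      have hvX : dvalN (X.take (j+1)) = 10 * A + na := by
        rw [htake, dvalN_append_singleton]
      have hvY : dvalN (Y.take (j+1)) = 10 * B + nb := by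
        rw [htakeY, dvalN_append_singleton]
      set m := na + nb + c with hm
      set T' := A + B + m / 10 with hT'
      have hT : dvalN (X.take (j+1)) + dvalN (Y.take (j+1)) + c = 10 * T' + m % 10 := by
        rw [hvX, hvY]; omega
      have e1 : (dvalN (X.take (j+1)) + dvalN (Y.take (j+1)) + c) / 10 ^ (j+1) = T' / 10 ^ j := by
        rw [hT, show (10:ℕ) ^ (j+1) = 10 * 10 ^ j by ring, ← Nat.div_div_eq_div_mul,
            show (10 * T' + m % 10) / 10 = T' by omega]
      have e2 : (dvalN (X.take (j+1)) + dvalN (Y.take (j+1)) + c) % 10 ^ (j+1)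
          = 10 * (T' % 10 ^ j) + m % 10 := by
        conv_lhs => rw [hT]
        have hd : T' = 10 ^ j * (T' / 10 ^ j) + T' % 10 ^ j := by
          conv_lhs => rw [← Nat.div_add_mod T' (10 ^ j)]
        have hlt : 10 * (T' % 10 ^ j) + m % 10 < 10 * 10 ^ j := by
          have := Nat.mod_lt T' (show 0 < 10 ^ j by positivity)
          omega
        calc (10 * T' + m % 10) % 10 ^ (j+1)
            = (10 * (10 ^ j * (T' / 10 ^ j) + T' % 10 ^ j) + m % 10) % 10 ^ (j+1) := by
              rw [← hd]
          _ = ((10 * (T' % 10 ^ j) + m % 10) + (T' / 10 ^ j) * 10 ^ (j+1)) % 10 ^ (j+1) := by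
              ring_nf
          _ = (10 * (T' % 10 ^ j) + m % 10) % 10 ^ (j+1) := by
              rw [Nat.add_mul_mod_self_right]
          _ = 10 * (T' % 10 ^ j) + m % 10 := Nat.mod_eq_of_lt (by
              calc 10 * (T' % 10 ^ j) + m % 10 < 10 * 10 ^ j := hlt
              _ = 10 ^ (j+1) := by ring)
      have e3 : digitsBE (j+1) ((dvalN (X.take (j+1)) + dvalN (Y.take (j+1)) + c) % 10 ^ (j+1))
          = digitsBE j (T' % 10 ^ j) ++ [m % 10] := by
        rw [e2, digitsBE]
        congr 2
        · omega
        · omega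
      rw [e1, e3]
      simp

lemma prefix_singleton_iff (a : Char) (l : List Char) : [a] <+: l ↔ l.head? = some a := by
  constructor
  · rintro ⟨t, rfl⟩; rfl
  · intro h; cases l <;> simp_all

lemma infix_singleton_mem (a : Char) (l : List Char) : [a] <:+: l ↔ a ∈ l := by
  rw [List.infix_iff_prefix_suffix]
  constructor
  · rintro ⟨t, ⟨u, rfl⟩, v, rfl⟩; simp
  · intro h; obtain ⟨s, t, rfl⟩ := List.append_of_mem h
    exact ⟨a :: t, ⟨t, rfl⟩, s, by simp⟩

-- A's find/slice split and B's in/takeWhile/drop split produce the same pair, of digit strings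
lemma split_both (cs : List Char) (h1 : ∀ c ∈ cs, c.isDigit = true ∨ c = '.')
    (h2 : cs.count '.' ≤ 1) :
    ∃ I D, intAndDec cs = (I, D) ∧ splitB cs = (I, D) ∧
      (∀ c ∈ I, c.isDigit = true) ∧ (∀ c ∈ D, c.isDigit = true) := by
  by_cases hdot : '.' ∈ cs
  · -- decompose at the first dot
    set p := cs.takeWhile (fun c => c ≠ '.') with hp
    set d := cs.dropWhile (fun c => c ≠ '.') with hd
    have hcs : p ++ d = cs := List.takeWhile_append_dropWhile
    have hpdot : ∀ c ∈ p, c ≠ '.' := by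
      intro c hc
      have := List.mem_takeWhile_imp hc; simpa using this
    have hdne : d ≠ [] := by
      intro h0
      rw [h0, List.append_nil] at hcs
      exact (hpdot '.' (hcs ▸ hdot)) rfl
    obtain ⟨c0, q, hdq⟩ := List.exists_cons_of_ne_nil hdne
    have hc0 : c0 = '.' := by
      have hne' : cs.dropWhile (fun c => c ≠ '.') ≠ [] := by rw [← hd]; exact hdne
      have hhead := List.head_dropWhile_not (fun c => c ≠ '.') hne'
      have e : cs.dropWhile (fun c => c ≠ '.') = c0 :: q := hd.symm.trans hdq
      simp only [e, List.head_cons] at hhead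
      simpa using hhead
    subst hc0
    rw [hdq] at hcs
    have hqdot : '.' ∉ q := by
      intro hq
      have : 2 ≤ cs.count '.' := by
        rw [← hcs]
        have h1c : 1 ≤ q.count '.' := List.one_le_count_iff.mpr hq
        simp [List.count_append]
        omega
      omega
    refine ⟨p, q, ?_, ?_, ?_, ?_⟩
    · -- intAndDec
      have hfind : PySem.Chars.find cs ['.'] = (p.length : Int) := by
        have hinf : ['.'] <:+: cs := (infix_singleton_mem _ _).mpr hdot
        have h0 : 0 ≤ PySem.Chars.find cs ['.'] := (PySem.Chars.find_nonneg_iff _ _).mpr hinf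
        obtain ⟨hpre, hmin⟩ := PySem.Chars.find_spec h0
        set k := (PySem.Chars.find cs ['.']).toNat with hk
        have hkp : k = p.length := by
          by_contra hne
          rcases Nat.lt_or_ge k p.length with hlt | hge
          · have : cs.drop k = p.drop k ++ ('.' :: q) := by
              rw [← hcs, List.drop_append_of_le_length (by omega)]
            rw [this] at hpre
            have hh := (prefix_singleton_iff _ _).mp hpre
            have hpd : (p.drop k).head? = some '.' := by
              cases hpk : p.drop k with
              | nil => simp [List.drop_eq_nil_iff] at hpk; omega
              | cons a t => rw [hpk] at hh; simpa using hh
            have : '.' ∈ p := List.mem_of_mem_drop (List.mem_of_mem_head? hpd)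
            exact hpdot '.' this rfl
          · have hlt : p.length < k := by omega
            refine hmin p.length hlt ?_
            rw [← hcs, List.drop_left]
            exact ⟨q, rfl⟩
        omega
      rw [intAndDec, hfind]
      rw [if_neg (by omega)]
      have e1 : PySem.List.slice cs (some 0) (some (p.length : Int)) = p := by
        rw [PySem.List.slice_zero_start, PySem.List.slice_to_natCast, ← hcs, List.take_left]
      have e2 : PySem.List.slice cs (some ((p.length : Int) + 1)) (some (cs.length : Int)) = q := by
        rw [show ((p.length : Int) + 1) = ((p.length + 1 : Nat) : Int) by push_cast; ring,
            PySem.List.slice_natCast, ← hcs]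
        rw [show p ++ '.' :: q = (p ++ ['.']) ++ q by simp]
        rw [List.drop_left' (by simp)]
        apply List.take_of_length_le
        simp
        omega
      rw [e1, e2]
    · -- splitB
      rw [splitB, if_pos (by rw [PySem.Chars.isIn_iff_infix]; exact (infix_singleton_mem _ _).mpr hdot)]
      have et : cs.takeWhile (fun c => c ≠ '.') = p := hp.symm
      rw [et]
      have ed : cs.drop (p.length + 1) = q := by
        rw [← hcs, show p ++ '.' :: q = (p ++ ['.']) ++ q by simp, List.drop_left' (by simp)]
      rw [ed]
    · intro c hc
      rcases h1 c (by rw [← hcs]; simp [hc]) with h | h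
      · exact h
      · exact absurd h (hpdot c hc)
    · intro c hc
      rcases h1 c (by rw [← hcs]; simp [hc]) with h | h
      · exact h
      · subst h; exact absurd hc hqdot
  · refine ⟨cs, ['0'], ?_, ?_, ?_, by simp⟩
    · rw [intAndDec, if_pos]
      rw [PySem.Chars.find_eq_neg_one_iff]
      rw [infix_singleton_mem]
      exact hdot
    · rw [splitB, if_neg]
      rw [Bool.not_eq_true, PySem.Chars.isIn_eq_false_iff, infix_singleton_mem]
      exact hdot
    · intro c hc
      rcases h1 c hc with h | h
      · exact h
      · subst h; exact absurd hc hdot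

-- the common value both ports compute, in terms of digit lists
def canonical (I1 D1 I2 D2 : List Char) : String :=
  let L := max D1.length D2.length
  let S := dvalN (D1 ++ List.replicate (L - D1.length) '0')
         + dvalN (D2 ++ List.replicate (L - D2.length) '0')
  let IL := max I1.length I2.length
  let T := dvalN I1 + dvalN I2 + S / 10 ^ L
  let head := if T / 10 ^ IL = 0 then (digitsBE IL (T % 10 ^ IL)).map Nat.digitChar
              else Nat.digitChar (T / 10 ^ IL) :: (digitsBE IL (T % 10 ^ IL)).map Nat.digitChar
  String.ofList (if D1 = ['0'] ∧ D2 = ['0'] then head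
                 else head ++ '.' :: (digitsBE L (S % 10 ^ L)).map Nat.digitChar)

lemma digit_no_sign {c : Char} (h : c.isDigit = true) : ¬(c = '+' ∨ c = '-') := by
  have := isDigit_toNat h
  rintro (rfl | rfl) <;> simp [Char.toNat] at this

lemma repD_ne_nil (n : Nat) : repD n ≠ [] := by
  rw [repD]; split
  · simp
  · simp [Nat.digits_ne_nil_iff_ne_zero, *]

lemma join_digit_list (l : List Nat) (hl : ∀ d ∈ l, d < 10) :
    PySem.Chars.join [] ((l.map (fun d : Nat => (d : Int))).map PySem.Int.toChars)
      = l.map Nat.digitChar := by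
  have h : ∀ l : List Nat, (∀ d ∈ l, d < 10) → (l.map (fun d : Nat => (d : Int))).map PySem.Int.toChars
      = (l.map Nat.digitChar).map (fun c => [c]) := by
    intro l hl
    induction l with
    | nil => rfl
    | cons d l ih =>
        simp only [List.map_cons, toChars_digit d (hl d (by simp)), List.cons.injEq]
        exact ⟨trivial, ih (fun a ha => hl a (by simp [ha]))⟩
  rw [h l hl, PySem.Chars.join_nil_singletons]

lemma pad_foldl (X Y : List Char) (h : X.length ≤ Y.length) :
    List.foldl (fun s _ => s ++ ['0']) X (PySem.List.pyRange 0 ((Y.length : Int) - (X.length : Int)))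
      = X ++ List.replicate (Y.length - X.length) '0' := by
  rw [show ((Y.length : Int) - (X.length : Int)) = ((Y.length - X.length : Nat) : Int) by omega,
      PySem.List.pyRange_zero_natCast, foldl_append_zero]
  simp

-- zfill-padded decimal string of T to width IL, as big-endian digit lists
lemma pad_repD (IL T : Nat) (hIL : 0 < IL) (hT : T < 2 * 10 ^ IL) :
    List.replicate (IL - (repD T).length) 0 ++ repD T
      = if T / 10 ^ IL = 0 then digitsBE IL (T % 10 ^ IL)
        else T / 10 ^ IL :: digitsBE IL (T % 10 ^ IL) := by
  have hpow : 0 < 10 ^ IL := by positivity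
  by_cases hc : T / 10 ^ IL = 0
  · rw [if_pos hc]
    have hTlt : T < 10 ^ IL := by
      rcases Nat.lt_or_ge T (10 ^ IL) with h | h
      · exact h
      · exact absurd hc (by
          have : 1 ≤ T / 10 ^ IL := (Nat.one_le_div_iff hpow).mpr h
          omega)
    rw [Nat.mod_eq_of_lt hTlt]
    by_cases h0 : T = 0
    · subst h0
      rw [repD, if_pos rfl, digitsBE_pad IL 0 hpow]
      simp [← List.replicate_succ' (n := IL - 1), show IL - 1 + 1 = IL by omega]
    · rw [repD, if_neg h0, digitsBE_pad IL T hTlt]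
      simp
  · rw [if_neg hc]
    have hge : 10 ^ IL ≤ T := by
      by_contra hlt
      exact hc (Nat.div_eq_of_lt (by omega))
    have h0 : T ≠ 0 := by omega
    have hT2 : T < 10 ^ (IL + 1) := by
      calc T < 2 * 10 ^ IL := hT
      _ ≤ 10 * 10 ^ IL := by omega
      _ = 10 ^ (IL + 1) := by ring
    have hlen : (Nat.digits 10 T).length = IL + 1 := by
      have hle : (Nat.digits 10 T).length ≤ IL + 1 :=
        (Nat.digits_length_le_iff (by norm_num) T).mpr hT2
      have hgt : IL < (Nat.digits 10 T).length :=
        (Nat.lt_digits_length_iff (by norm_num) T).mpr hge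
      omega
    rw [repD, if_neg h0]
    rw [show IL - (Nat.digits 10 T).reverse.length = 0 by simp [hlen], List.replicate_zero,
        List.nil_append]
    have : (Nat.digits 10 T).reverse = digitsBE (IL + 1) T := by
      rw [digitsBE_pad (IL + 1) T hT2, hlen]
      simp
    rw [this, digitsBE_cons IL T hT2]

lemma div_le_one_of_lt_two_mul (a b : Nat) (hb : 0 < b) (h : a < 2 * b) : a / b ≤ 1 := by
  have h2 : a / b < 2 := by rw [Nat.div_lt_iff_lt_mul hb]; omega
  omega

lemma A_eval (num1 num2 : String) (I1 D1 I2 D2 : List Char)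
    (e1 : intAndDec num1.toList = (I1, D1)) (e2 : intAndDec num2.toList = (I2, D2))
    (hI1 : ∀ c ∈ I1, c.isDigit = true) (hD1 : ∀ c ∈ D1, c.isDigit = true)
    (hI2 : ∀ c ∈ I2, c.isDigit = true) (hD2 : ∀ c ∈ D2, c.isDigit = true) :
    longnum_added num1 num2 = canonical I1 D1 I2 D2 := by
  rw [longnum_added, e1, e2, canonical]
  dsimp only
  set L := max D1.length D2.length with hL
  set IL := max I1.length I2.length with hIL
  have hDL1 : D1.length ≤ L := by rw [hL]; exact le_max_left _ _
  have hDL2 : D2.length ≤ L := by rw [hL]; exact le_max_right _ _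
  have hIL1 : I1.length ≤ IL := by rw [hIL]; exact le_max_left _ _
  have hIL2 : I2.length ≤ IL := by rw [hIL]; exact le_max_right _ _
  -- both padding branches produce right-padding to length L
  have hpad1 : (if D1.length > D2.length then D1
      else List.foldl (fun s _ => s ++ ['0']) D1 (PySem.List.pyRange 0 ((D2.length : Int) - (D1.length : Int))))
      = D1 ++ List.replicate (L - D1.length) '0' := by
    by_cases h : D1.length > D2.length
    · have hLe : L = D1.length := by rw [hL]; exact Nat.max_eq_left (by omega)
      rw [if_pos h, hLe]; simp
    · have hLe : L = D2.length := by rw [hL]; exact Nat.max_eq_right (by omega)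
      rw [if_neg h, pad_foldl _ _ (by omega), hLe]
  have hpad2 : (if D1.length > D2.length then
        List.foldl (fun s _ => s ++ ['0']) D2 (PySem.List.pyRange 0 ((D1.length : Int) - (D2.length : Int)))
      else D2)
      = D2 ++ List.replicate (L - D2.length) '0' := by
    by_cases h : D1.length > D2.length
    · have hLe : L = D1.length := by rw [hL]; exact Nat.max_eq_left (by omega)
      rw [if_pos h, pad_foldl _ _ (by omega), hLe]
    · have hLe : L = D2.length := by rw [hL]; exact Nat.max_eq_right (by omega)
      rw [if_neg h, hLe]; simp
  rw [hpad1, hpad2]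
  set d1 := D1 ++ List.replicate (L - D1.length) '0' with hd1
  set d2 := D2 ++ List.replicate (L - D2.length) '0' with hd2
  have hd1dig : ∀ c ∈ d1, c.isDigit = true := by
    intro c hc
    rcases List.mem_append.mp hc with h | h
    · exact hD1 c h
    · rw [List.eq_of_mem_replicate h]; decide
  have hd2dig : ∀ c ∈ d2, c.isDigit = true := by
    intro c hc
    rcases List.mem_append.mp hc with h | h
    · exact hD2 c h
    · rw [List.eq_of_mem_replicate h]; decide
  have hd1len : d1.length = L := by rw [hd1]; simp; omega
  have hd2len : d2.length = L := by rw [hd2]; simp; omega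
  set S := dvalN d1 + dvalN d2 with hS
  have hSlt : S < 2 * 10 ^ L := by
    have h1 := dvalN_lt d1 hd1dig
    have h2 := dvalN_lt d2 hd2dig
    rw [hd1len] at h1; rw [hd2len] at h2
    omega
  have hdcle : S / 10 ^ L ≤ 1 := div_le_one_of_lt_two_mul _ _ (by positivity) hSlt
  have hloop1 : List.foldl (stepA d1 d2) (List.replicate (L + 1) (0 : Int))
      (PySem.List.pyRange ((L : Int) - 1) (-1) (-1))
      = ((S / 10 ^ L : Nat) : Int) :: (digitsBE L (S % 10 ^ L)).map (fun d : Nat => (d : Int)) := by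
    have h := loop_inv d1 d2 hd1dig hd2dig L 0 [] (by omega) (by omega) (by omega)
    rw [show List.replicate (L + 1) (0 : Int)
        = List.replicate L (0 : Int) ++ ((0 : Nat) : Int) :: [] by simp [List.replicate_succ']]
    rw [h, List.take_of_length_le (by omega), List.take_of_length_le (by omega)]
    simp [hS]
  rw [hloop1]
  have hgd1 : PySem.List.pyGetD
      (((S / 10 ^ L : Nat) : Int) :: (digitsBE L (S % 10 ^ L)).map (fun d : Nat => (d : Int))) 0 0
      = ((S / 10 ^ L : Nat) : Int) := by simp [pysem]
  rw [hgd1]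
  have hret1 : (if ((S / 10 ^ L : Nat) : Int) = 1 then (List.replicate (IL + 1) (0 : Int)).set IL 1
      else List.replicate (IL + 1) (0 : Int))
      = List.replicate IL (0 : Int) ++ ((S / 10 ^ L : Nat) : Int) :: [] := by
    by_cases h : S / 10 ^ L = 1
    · rw [if_pos (by rw [h]; norm_num), h,
          show List.replicate (IL + 1) (0 : Int) = List.replicate IL (0 : Int) ++ (0 : Int) :: [] by
            simp [List.replicate_succ'],
          set_replicate_append]
      norm_num
    · have h0 : S / 10 ^ L = 0 := Nat.lt_one_iff.mp (Nat.lt_of_le_of_ne hdcle h)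
      rw [if_neg (by rw [h0]; norm_num), h0]
      simp [List.replicate_succ']
  rw [hret1]
  have hz1 : PySem.Chars.zfill I1 (IL : Int) = List.replicate (IL - I1.length) '0' ++ I1 := by
    rw [zfill_no_sign _ _ ?_, Int.toNat_natCast]
    intro c hc
    cases I1 with
    | nil => simp at hc
    | cons a t =>
        have hca : c = a := by simpa using hc.symm
        subst hca
        exact digit_no_sign (hI1 c (by simp))
  have hz2 : PySem.Chars.zfill I2 (IL : Int) = List.replicate (IL - I2.length) '0' ++ I2 := by
    rw [zfill_no_sign _ _ ?_, Int.toNat_natCast]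
    intro c hc
    cases I2 with
    | nil => simp at hc
    | cons a t =>
        have hca : c = a := by simpa using hc.symm
        subst hca
        exact digit_no_sign (hI2 c (by simp))
  rw [hz1, hz2]
  set i1 := List.replicate (IL - I1.length) '0' ++ I1 with hi1
  set i2 := List.replicate (IL - I2.length) '0' ++ I2 with hi2
  have hi1dig : ∀ c ∈ i1, c.isDigit = true := by
    intro c hc
    rcases List.mem_append.mp hc with h | h
    · rw [List.eq_of_mem_replicate h]; decide
    · exact hI1 c h
  have hi2dig : ∀ c ∈ i2, c.isDigit = true := by
    intro c hc
    rcases List.mem_append.mp hc with h | h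
    · rw [List.eq_of_mem_replicate h]; decide
    · exact hI2 c h
  have hi1len : i1.length = IL := by rw [hi1]; simp; omega
  have hi2len : i2.length = IL := by rw [hi2]; simp; omega
  set T := dvalN I1 + dvalN I2 + S / 10 ^ L with hT
  have hvi1 : dvalN i1 = dvalN I1 := dvalN_replicate_zero _ _
  have hvi2 : dvalN i2 = dvalN I2 := dvalN_replicate_zero _ _
  have hTlt : T < 2 * 10 ^ IL := by
    have h1 := dvalN_lt i1 hi1dig
    have h2 := dvalN_lt i2 hi2dig
    rw [hi1len, hvi1] at h1; rw [hi2len, hvi2] at h2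
    omega
  have hloop2 : List.foldl (stepA i1 i2)
      (List.replicate IL (0 : Int) ++ ((S / 10 ^ L : Nat) : Int) :: [])
      (PySem.List.pyRange ((IL : Int) - 1) (-1) (-1))
      = ((T / 10 ^ IL : Nat) : Int) :: (digitsBE IL (T % 10 ^ IL)).map (fun d : Nat => (d : Int)) := by
    have h := loop_inv i1 i2 hi1dig hi2dig IL (S / 10 ^ L) [] (by omega) (by omega) hdcle
    rw [h, List.take_of_length_le (by omega), List.take_of_length_le (by omega), hvi1, hvi2]
    simp [hT]
  rw [hloop2]
  have hgd2 : PySem.List.pyGetD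
      (((T / 10 ^ IL : Nat) : Int) :: (digitsBE IL (T % 10 ^ IL)).map (fun d : Nat => (d : Int))) 0 0
      = ((T / 10 ^ IL : Nat) : Int) := by simp [pysem]
  rw [hgd2]
  -- the head digit list
  have hheadeq : (if ((T / 10 ^ IL : Nat) : Int) = 0 then
        PySem.List.slice
          (((T / 10 ^ IL : Nat) : Int) :: (digitsBE IL (T % 10 ^ IL)).map (fun d : Nat => (d : Int)))
          (some 1) (some ((IL : Int) + 1))
      else ((T / 10 ^ IL : Nat) : Int) :: (digitsBE IL (T % 10 ^ IL)).map (fun d : Nat => (d : Int)))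
      = (if T / 10 ^ IL = 0 then digitsBE IL (T % 10 ^ IL)
         else T / 10 ^ IL :: digitsBE IL (T % 10 ^ IL)).map (fun d : Nat => (d : Int)) := by
    by_cases h : T / 10 ^ IL = 0
    · rw [if_pos (by exact_mod_cast congrArg (Nat.cast : Nat → Int) h), if_pos h]
      rw [show ((IL : Int) + 1) = ((IL + 1 : Nat) : Int) by push_cast; ring,
          show (1 : Int) = ((1 : Nat) : Int) by norm_num, PySem.List.slice_natCast]
      simp [List.take_of_length_le, length_digitsBE]
    · rw [if_neg (by exact_mod_cast fun hh => h (by exact_mod_cast hh)), if_neg h]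
      simp
  rw [hheadeq]
  -- joins
  have hjoin1 : PySem.Chars.join []
      (((if T / 10 ^ IL = 0 then digitsBE IL (T % 10 ^ IL)
         else T / 10 ^ IL :: digitsBE IL (T % 10 ^ IL)).map (fun d : Nat => (d : Int))).map
        PySem.Int.toChars)
      = (if T / 10 ^ IL = 0 then digitsBE IL (T % 10 ^ IL)
         else T / 10 ^ IL :: digitsBE IL (T % 10 ^ IL)).map Nat.digitChar := by
    apply join_digit_list
    intro d hd
    by_cases h : T / 10 ^ IL = 0 <;> simp [h] at hd
    · exact digitsBE_lt _ _ _ hd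
    · rcases hd with rfl | hd
      · have := div_le_one_of_lt_two_mul _ _ (show 0 < 10 ^ IL by positivity) hTlt
        omega
      · exact digitsBE_lt _ _ _ hd
  rw [hjoin1]
  -- decimal slice and join
  have hslice : PySem.List.slice
      (((S / 10 ^ L : Nat) : Int) :: (digitsBE L (S % 10 ^ L)).map (fun d : Nat => (d : Int)))
      (some 1)
      (some (((((S / 10 ^ L : Nat) : Int) :: (digitsBE L (S % 10 ^ L)).map (fun d : Nat => (d : Int))).length : Int)))
      = (digitsBE L (S % 10 ^ L)).map (fun d : Nat => (d : Int)) := by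
    rw [show ((((S / 10 ^ L : Nat) : Int) :: (digitsBE L (S % 10 ^ L)).map (fun d : Nat => (d : Int))).length)
        = L + 1 by simp [length_digitsBE],
        show ((L + 1 : Nat) : Int) = ((L : Int) + 1) by push_cast; ring]
    rw [show ((L : Int) + 1) = ((L + 1 : Nat) : Int) by push_cast; ring,
        show (1 : Int) = ((1 : Nat) : Int) by norm_num, PySem.List.slice_natCast]
    simp [List.take_of_length_le, length_digitsBE]
  rw [hslice]
  have hjoin2 : PySem.Chars.join []
      (((digitsBE L (S % 10 ^ L)).map (fun d : Nat => (d : Int))).map PySem.Int.toChars)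
      = (digitsBE L (S % 10 ^ L)).map Nat.digitChar :=
    join_digit_list _ (digitsBE_lt _ _)
  rw [hjoin2]
  -- final: the no_deci branch
  by_cases hnd : D1 = ['0'] ∧ D2 = ['0']
  · rw [if_pos hnd, if_pos hnd, if_neg (by norm_num)]
    by_cases h : T / 10 ^ IL = 0 <;> simp [h]
  · rw [if_neg hnd, if_neg hnd, if_pos rfl]
    by_cases h : T / 10 ^ IL = 0 <;> simp [h]

lemma B_eval (num1 num2 : String) (I1 D1 I2 D2 : List Char)
    (e1 : splitB num1.toList = (I1, D1)) (e2 : splitB num2.toList = (I2, D2))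
    (hI1 : ∀ c ∈ I1, c.isDigit = true) (hD1 : ∀ c ∈ D1, c.isDigit = true)
    (hI2 : ∀ c ∈ I2, c.isDigit = true) (hD2 : ∀ c ∈ D2, c.isDigit = true) :
    longnum_added_alt num1 num2 = canonical I1 D1 I2 D2 := by
  rw [longnum_added_alt, e1, e2, canonical]
  dsimp only
  set L := max D1.length D2.length with hL
  set IL := max I1.length I2.length with hIL
  have hDL1 : D1.length ≤ L := by rw [hL]; exact le_max_left _ _
  have hDL2 : D2.length ≤ L := by rw [hL]; exact le_max_right _ _
  have hIL1 : I1.length ≤ IL := by rw [hIL]; exact le_max_left _ _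
  have hIL2 : I2.length ≤ IL := by rw [hIL]; exact le_max_right _ _
  set d1 := D1 ++ List.replicate (L - D1.length) '0' with hd1
  set d2 := D2 ++ List.replicate (L - D2.length) '0' with hd2
  have hd1dig : ∀ c ∈ d1, c.isDigit = true := by
    intro c hc
    rcases List.mem_append.mp hc with h | h
    · exact hD1 c h
    · rw [List.eq_of_mem_replicate h]; decide
  have hd2dig : ∀ c ∈ d2, c.isDigit = true := by
    intro c hc
    rcases List.mem_append.mp hc with h | h
    · exact hD2 c h
    · rw [List.eq_of_mem_replicate h]; decide
  have hd1len : d1.length = L := by rw [hd1]; simp; omega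
  have hd2len : d2.length = L := by rw [hd2]; simp; omega
  set S := dvalN d1 + dvalN d2 with hS
  have hSlt : S < 2 * 10 ^ L := by
    have h1 := dvalN_lt d1 hd1dig
    have h2 := dvalN_lt d2 hd2dig
    rw [hd1len] at h1; rw [hd2len] at h2
    omega
  have hdcle : S / 10 ^ L ≤ 1 := div_le_one_of_lt_two_mul _ _ (by positivity) hSlt
  set T := dvalN I1 + dvalN I2 + S / 10 ^ L with hT
  have hTlt : T < 2 * 10 ^ IL := by
    have h1 := dvalN_lt I1 hI1
    have h2 := dvalN_lt I2 hI2
    have b1 : (10:Nat) ^ I1.length ≤ 10 ^ IL := Nat.pow_le_pow_right (by norm_num) hIL1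
    have b2 : (10:Nat) ^ I2.length ≤ 10 ^ IL := Nat.pow_le_pow_right (by norm_num) hIL2
    have hp : 1 ≤ (10:Nat) ^ IL := Nat.one_le_pow _ _ (by norm_num)
    omega
  have hds : pyIntDigits ('0' :: d1) + pyIntDigits ('0' :: d2) = ((S : Nat) : Int) := by
    rw [pyIntDigits, pyIntDigits, dvalN_cons_zero, dvalN_cons_zero, hS]
    push_cast; ring
  rw [hds]
  have hdm : (PySem.Int.divmod? ((S : Nat) : Int) ((10 : Int) ^ L)).getD (0, 0)
      = (((S / 10 ^ L : Nat) : Int), ((S % 10 ^ L : Nat) : Int)) := by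
    rw [PySem.Int.divmod?, if_neg (by positivity)]
    rw [Option.getD_some]
    rw [show ((10 : Int) ^ L) = ((10 ^ L : Nat) : Int) by push_cast; ring]
    rw [← Int.ofNat_fdiv, ← Int.ofNat_fmod]
  rw [hdm]
  dsimp only
  have hdec : PySem.List.slice
      (PySem.Int.toChars ((10 : Int) ^ L + ((S % 10 ^ L : Nat) : Int))) (some 1) none
      = (digitsBE L (S % 10 ^ L)).map Nat.digitChar := by
    rw [show ((10 : Int) ^ L + ((S % 10 ^ L : Nat) : Int)) = (((10 ^ L + S % 10 ^ L : Nat)) : Int) by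
          push_cast; ring,
        toChars_natCast]
    have hm : S % 10 ^ L < 10 ^ L := Nat.mod_lt _ (by positivity)
    have hpow : 0 < 10 ^ L := by positivity
    rw [repD, if_neg (by omega), digits_pow_add L _ hm]
    rw [PySem.List.slice_from _ (by norm_num : (0:Int) ≤ 1)]
    simp
  rw [hdec]
  have htot : pyIntDigits ('0' :: I1) + pyIntDigits ('0' :: I2) + ((S / 10 ^ L : Nat) : Int)
      = ((T : Nat) : Int) := by
    rw [pyIntDigits, pyIntDigits, dvalN_cons_zero, dvalN_cons_zero, hT]
    push_cast; ring
  rw [htot]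
  -- the head
  have hhead : (if IL = 0 then (if ((T : Nat) : Int) = 0 then ([] : List Char) else PySem.Int.toChars ((T : Nat) : Int))
      else PySem.Chars.zfill (PySem.Int.toChars ((T : Nat) : Int)) (IL : Int))
      = if T / 10 ^ IL = 0 then (digitsBE IL (T % 10 ^ IL)).map Nat.digitChar
        else Nat.digitChar (T / 10 ^ IL) :: (digitsBE IL (T % 10 ^ IL)).map Nat.digitChar := by
    by_cases hIL0 : IL = 0
    · rw [if_pos hIL0, hIL0]
      rw [pow_zero, Nat.div_one, Nat.mod_one]
      have hT1 : T ≤ 1 := by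
        have hI1n : I1 = [] := List.eq_nil_of_length_eq_zero (by omega)
        have hI2n : I2 = [] := List.eq_nil_of_length_eq_zero (by omega)
        rw [hT, hI1n, hI2n]
        simpa [dvalN] using hdcle
      by_cases h0 : T = 0
      · rw [if_pos (by exact_mod_cast congrArg (Nat.cast : Nat → Int) h0), if_pos h0]
        rfl
      · have h1 : T = 1 := Nat.le_antisymm hT1 (Nat.one_le_iff_ne_zero.mpr h0)
        rw [if_neg (by exact_mod_cast fun hh => h0 (by exact_mod_cast hh)), if_neg h0, h1]
        rw [toChars_digit 1 (by norm_num)]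
        rfl
    · rw [if_neg hIL0, toChars_natCast]
      have hz : PySem.Chars.zfill ((repD T).map Nat.digitChar) (IL : Int)
          = List.replicate (IL - ((repD T).map Nat.digitChar).length) '0'
            ++ (repD T).map Nat.digitChar := by
        rw [zfill_no_sign _ _ ?_, Int.toNat_natCast]
        intro c hc
        obtain ⟨d, rest, hdr⟩ := List.exists_cons_of_ne_nil (repD_ne_nil T)
        rw [hdr] at hc
        have hcd : c = Nat.digitChar d := by simpa using hc.symm
        subst hcd
        exact digitChar_no_sign d (repD_lt T d (hdr ▸ (by simp)))
      rw [hz, List.length_map]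
      have hmap : List.replicate (IL - (repD T).length) '0' ++ (repD T).map Nat.digitChar
          = (List.replicate (IL - (repD T).length) 0 ++ repD T).map Nat.digitChar := by
        rw [List.map_append, List.map_replicate,
            show Nat.digitChar 0 = '0' from rfl]
      rw [hmap, pad_repD IL T (Nat.pos_of_ne_zero hIL0) hTlt]
      by_cases hc2 : T / 10 ^ IL = 0
      · rw [if_pos hc2, if_pos hc2]
      · rw [if_neg hc2, if_neg hc2]
        rfl
  rw [hhead]

-- ===== VERDICT (by name: the statement is the Claim_ definition above) =====
theorem longnum_added_spec : Claim_equal_longnum_added := by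
  intro num1 num2 _ hPre
  obtain ⟨h11, h12, h21, h22⟩ := hPre
  have h11' : ∀ c ∈ num1.toList, c.isDigit = true ∨ c = '.' := by
    intro c hc
    have := List.all_eq_true.mp h11 c hc
    simpa using this
  have h21' : ∀ c ∈ num2.toList, c.isDigit = true ∨ c = '.' := by
    intro c hc
    have := List.all_eq_true.mp h21 c hc
    simpa using this
  obtain ⟨I1, D1, hA1, hB1, hI1, hD1⟩ := split_both num1.toList h11' h12
  obtain ⟨I2, D2, hA2, hB2, hI2, hD2⟩ := split_both num2.toList h21' h22
  unfold Spec_longnum_added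
  rw [A_eval num1 num2 I1 D1 I2 D2 hA1 hA2 hI1 hD1 hI2 hD2,
      B_eval num1 num2 I1 D1 I2 D2 hB1 hB2 hI1 hD1 hI2 hD2]
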